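-- pv_equiv track=rewrite | github.com/Mike010111/ti-lab1 | main.py | _clean_key_playfair
-- ===== SOURCE A (Python) =====
-- def _clean_key_playfair(raw_key: str) -> str:
--     # Очищает ключ для шифра Плейфейра: только буквы A-Z, J -> I, без повторов
--     result = []
--     seen = set()
--     for ch in raw_key:
--         if ch.isalpha():
--             c = ch.upper()
--             if "A" <= c <= "Z":
--                 if c == "J":
--                     c = "I"
--                 if c not in seen:
--                     seen.add(c)
--                     result.append(c)
--     return "".join(result)
-- ===== SOURCE B (Python) =====
-- def _clean_key_playfair(raw_key: str) -> str:
--     # Recursive remove-ahead algorithm: skip to the first valid letter, emit it, then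
--     # recurse on the tail with every character normalizing to that letter removed.
--     # No seen-set / dict is ever maintained; recursion depth is at most 25.
--     def norm(ch):
--         if ch.isalpha():
--             u = ch.upper()
--             if "A" <= u <= "Z":
--                 return "I" if u == "J" else u
--         return None
--
--     def go(chs):
--         i = 0
--         while i < len(chs) and norm(chs[i]) is None:
--             i += 1
--         if i == len(chs):
--             return ""
--         c = norm(chs[i])
--         return c + go([x for x in chs[i + 1:] if norm(x) != c])
--
--     return go(list(raw_key))
-- ===== Notes on version B (the rewrite author's own statement) =====
-- stated objective: alternative
-- what changed: Replaces A's single pass with an interleaved seen-set by a recursive remove-ahead algorithm: emit the first valid letter and recurse on the tail with all occurrences of that letter filtered out, so no seen structure is maintained at all.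
import Mathlib
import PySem

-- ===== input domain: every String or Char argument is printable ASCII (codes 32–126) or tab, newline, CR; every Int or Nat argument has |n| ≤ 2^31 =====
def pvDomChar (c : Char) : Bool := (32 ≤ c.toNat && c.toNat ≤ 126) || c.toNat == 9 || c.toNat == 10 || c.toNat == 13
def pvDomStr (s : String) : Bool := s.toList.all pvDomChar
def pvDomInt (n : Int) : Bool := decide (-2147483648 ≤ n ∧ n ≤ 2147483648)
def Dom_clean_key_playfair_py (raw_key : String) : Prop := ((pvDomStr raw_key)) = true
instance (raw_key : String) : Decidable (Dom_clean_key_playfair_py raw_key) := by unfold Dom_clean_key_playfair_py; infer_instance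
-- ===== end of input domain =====

-- B replaces A's single pass with an interleaved seen-set by a recursive remove-ahead
-- algorithm (emit first valid letter, recurse on the tail with its duplicates filtered out);
-- an alternative of similar cost, no seen structure maintained.


-- ===== PORT A =====
-- A's loop body: if ch is a letter whose upper-case is in A..Z (J mapped to I),
-- append it to result and add it to seen when not yet seen
def pvStepA (st : List Char × PySem.Set Char) (ch : Char) : List Char × PySem.Set Char :=
  if PySem.Chars.isalpha ch then
    let c := PySem.Chars.upperChar ch
    if 'A' ≤ c ∧ c ≤ 'Z' then
      let c := if c = 'J' then 'I' else c
      if PySem.Set.contains st.2 c then st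
      else (st.1 ++ [c], PySem.Set.add st.2 c)
    else st
  else st

-- single pass: result list plus a 'seen' set, as in A
def clean_key_playfair_py (raw_key : String) : String :=
  String.ofList (raw_key.toList.foldl pvStepA ([], PySem.Set.empty)).1

-- ===== PORT B =====
-- B's helper norm: the valid cleaned letter of ch (J mapped to I), or None
def pvNormB (ch : Char) : Option Char :=
  if PySem.Chars.isalpha ch then
    let u := PySem.Chars.upperChar ch
    if 'A' ≤ u ∧ u ≤ 'Z' then some (if u = 'J' then 'I' else u) else none
  else none

-- B's go: skip to the first valid letter (the while loop = dropWhile), emit it and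
-- recurse on the tail with every character normalizing to that letter removed
def pvGoB (chs : List Char) : List Char :=
  match _h : chs.dropWhile (fun x => (pvNormB x).isNone) with
  | [] => []
  | x :: rest =>
    match pvNormB x with
    | some c => c :: pvGoB (rest.filter (fun y => pvNormB y ≠ some c))
    | none => []   -- unreachable: dropWhile stopped because pvNormB x is some
termination_by chs.length
decreasing_by
  have h1 : (chs.dropWhile (fun x => (pvNormB x).isNone)).length ≤ chs.length :=
    List.length_dropWhile_le _ _
  rw [_h] at h1
  have h2 : (rest.filter (fun y => pvNormB y ≠ some c)).length ≤ rest.length :=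
    List.length_filter_le _ _
  simp at h1
  omega

def clean_key_playfair_py_alt (raw_key : String) : String :=
  String.ofList (pvGoB raw_key.toList)

-- ===== PRECONDITION & SPEC =====
def Spec_clean_key_playfair_py (raw_key : String) (out : String) : Prop := out = clean_key_playfair_py_alt raw_key
instance (raw_key : String) (out : String) : Decidable (Spec_clean_key_playfair_py raw_key out) := by unfold Spec_clean_key_playfair_py; infer_instance

-- ===== CLAIM =====
def Claim_equal_clean_key_playfair_py : Prop := ∀ (raw_key : String), Dom_clean_key_playfair_py raw_key → Spec_clean_key_playfair_py raw_key (clean_key_playfair_py raw_key)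

-- ===== LEMMAS AND PROOFS =====

-- on a diagonal state, A's step is Set.add over pvNormB's output
theorem pvStepA_diag (r : List Char) (ch : Char) :
    pvStepA (r, r) ch
      = match pvNormB ch with
        | none => (r, r)
        | some c => (PySem.Set.add r c, PySem.Set.add r c) := by
  unfold pvStepA pvNormB PySem.Set.add
  by_cases ha : PySem.Chars.isalpha ch
  · simp only [ha, if_true]
    by_cases hr : 'A' ≤ PySem.Chars.upperChar ch ∧ PySem.Chars.upperChar ch ≤ 'Z'
    · simp only [hr]
      by_cases hmem :
          (if PySem.Chars.upperChar ch = 'J' then 'I' else PySem.Chars.upperChar ch) ∈ r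
      · simp [hmem]
      · simp [hmem]
    · simp [hr]
  · simp [ha]

-- A's loop keeps result = seen, advancing as Set.add folded over the cleaned letters
theorem pvLoopA_diag (l : List Char) (r : List Char) :
    l.foldl pvStepA (r, r)
      = ((l.filterMap pvNormB).foldl PySem.Set.add r,
         (l.filterMap pvNormB).foldl PySem.Set.add r) := by
  induction l generalizing r with
  | nil => simp
  | cons ch rest ih =>
    rw [List.foldl_cons, pvStepA_diag, List.filterMap_cons]
    cases pvNormB ch with
    | none => exact ih r
    | some c => simpa using ih (PySem.Set.add r c)

-- elements already in the accumulator may be filtered out of a Set.add fold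
theorem pvFoldAdd_filter (t : List Char) (s : List Char) (a : Char) (ha : a ∈ s) :
    t.foldl PySem.Set.add s = (t.filter (· ≠ a)).foldl PySem.Set.add s := by
  induction t generalizing s with
  | nil => simp
  | cons x rest ih =>
    by_cases hx : x = a
    · subst hx
      have : PySem.Set.add s x = s := by simp [PySem.Set.add, PySem.Set.contains, ha]
      simp [this, ih s ha]
    · have ha' : a ∈ PySem.Set.add s x := by
        simp [PySem.Set.add, PySem.Set.contains]
        split <;> simp [ha]
      simp [hx, ih _ ha']

-- a head element absent from the rest commutes out of a Set.add fold
theorem pvFoldAdd_cons (t : List Char) (s : List Char) (a : Char)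
    (h : ∀ x ∈ t, x ≠ a) :
    t.foldl PySem.Set.add (a :: s) = a :: t.foldl PySem.Set.add s := by
  induction t generalizing s with
  | nil => simp
  | cons x rest ih =>
    have hx : x ≠ a := h x (by simp)
    have hstep : PySem.Set.add (a :: s) x = a :: PySem.Set.add s x := by
      simp [PySem.Set.add, PySem.Set.contains, hx]
      split <;> simp
    rw [List.foldl_cons, hstep, List.foldl_cons, ih _ (fun y hy => h y (by simp [hy]))]

-- first-occurrence dedup satisfies the remove-ahead recursion
theorem pvOfList_cons_filter (a : Char) (t : List Char) :
    PySem.Set.ofList (a :: t) = a :: PySem.Set.ofList (t.filter (· ≠ a)) := by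
  have h1 : PySem.Set.ofList (a :: t) = t.foldl PySem.Set.add [a] := by
    rw [PySem.Set.ofList_eq_foldl]
    simp [PySem.Set.add, PySem.Set.contains]
  rw [h1, pvFoldAdd_filter t [a] a (by simp),
      pvFoldAdd_cons _ [] a (fun x hx => by simpa using (List.mem_filter.mp hx).2),
      PySem.Set.ofList_eq_foldl]

-- filtering on the source commutes with filterMap to filtering on the cleaned letters
theorem pvFilterMap_filter (l : List Char) (c : Char) :
    (l.filter (fun y => pvNormB y ≠ some c)).filterMap pvNormB
      = (l.filterMap pvNormB).filter (· ≠ c) := by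
  induction l with
  | nil => simp
  | cons x rest ih =>
    cases hx : pvNormB x with
    | none => simpa [List.filter_cons, List.filterMap_cons, hx] using ih
    | some u =>
      by_cases hu : u = c
      · subst hu; simpa [List.filter_cons, List.filterMap_cons, hx] using ih
      · simpa [List.filter_cons, List.filterMap_cons, hx, hu] using ih

-- dropped prefix characters contribute nothing to the cleaned letters
theorem pvFilterMap_dropWhile (l : List Char) :
    (l.dropWhile (fun x => (pvNormB x).isNone)).filterMap pvNormB = l.filterMap pvNormB := by
  induction l with
  | nil => simp
  | cons x rest ih =>
    cases hx : pvNormB x with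
    | none => simp [hx, ih]
    | some u => simp [hx]

-- the head of a dropWhile result falsifies the predicate
theorem pvDropWhile_head {α : Type} (p : α → Bool) (l : List α) (x : α) (rest : List α)
    (h : l.dropWhile p = x :: rest) : p x = false := by
  induction l with
  | nil => simp at h
  | cons a t ih =>
    rw [List.dropWhile_cons] at h
    by_cases hp : p a = true
    · exact ih (by simpa [hp] using h)
    · have hx : a = x := by simpa [hp] using congrArg List.head? h
      subst hx
      simpa using hp

-- B's recursion computes the first-occurrence dedup of the cleaned letters
theorem pvGoB_eq (chs : List Char) :
    pvGoB chs = PySem.Set.ofList (chs.filterMap pvNormB) := by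
  induction chs using pvGoB.induct with
  | case1 chs h =>
    have h2 := pvFilterMap_dropWhile chs
    rw [h] at h2
    rw [pvGoB, h, ← h2]
    rfl
  | case2 chs x rest h c hc ih =>
    have hd := pvFilterMap_dropWhile chs
    rw [h] at hd
    rw [pvGoB, h]
    simp only [hc, ih]
    rw [← hd, List.filterMap_cons, hc, pvOfList_cons_filter, pvFilterMap_filter]
  | case3 chs x rest h hc =>
    -- unreachable: dropWhile stopped at x, so pvNormB x is not none
    exfalso
    have hx := pvDropWhile_head _ _ _ _ h
    simp [hc] at hx

theorem pvPorts_eq (raw_key : String) :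
    clean_key_playfair_py raw_key = clean_key_playfair_py_alt raw_key := by
  unfold clean_key_playfair_py clean_key_playfair_py_alt
  rw [show (PySem.Set.empty : PySem.Set Char) = ([] : List Char) from rfl, pvLoopA_diag,
      pvGoB_eq, PySem.Set.ofList_eq_foldl]

-- ===== VERDICT =====
theorem clean_key_playfair_py_spec : Claim_equal_clean_key_playfair_py := by
  intro raw_key _
  exact pvPorts_eq raw_key
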